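-- pv_equiv track=rewrite | github.com/jiyoungzero/2023-Codingtest-Study | jiyoung풀이/BOJ문제/boj_1174줄어드는수.py | check
-- ===== SOURCE A (Python) =====
-- def check(num):
--     num_lst = [int(ele) for ele in str(num)]
--     l = len(num_lst)
--     for i in range(l):
--         for j in range(i+1, l):
--             if num_lst[i] <= num_lst[j]:
--                 return False
--     return True
-- ===== SOURCE B (Python) =====
-- def check(num):
--     s = str(num)
--     return all(a > b for a, b in zip(s, s[1:]))
-- ===== Notes on version B (the rewrite author's own statement) =====
-- stated objective: simpler
-- what changed: Replaced the O(l^2) all-pairs index comparison with a single pass over adjacent character pairs (valid by transitivity of strict decrease), comparing digit characters directly instead of converting each to int.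
import Mathlib
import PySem

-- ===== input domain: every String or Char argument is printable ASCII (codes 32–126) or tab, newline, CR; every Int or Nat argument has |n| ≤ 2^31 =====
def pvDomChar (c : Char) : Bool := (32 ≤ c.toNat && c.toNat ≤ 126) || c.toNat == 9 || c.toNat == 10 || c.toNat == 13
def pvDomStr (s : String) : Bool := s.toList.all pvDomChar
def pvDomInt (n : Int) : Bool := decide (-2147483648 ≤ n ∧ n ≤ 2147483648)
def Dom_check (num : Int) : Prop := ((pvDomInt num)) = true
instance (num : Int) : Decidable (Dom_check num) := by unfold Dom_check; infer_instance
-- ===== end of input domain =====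

-- B replaces A's O(l^2) all-pairs digit comparison with one adjacent-pair pass over the digit
-- characters (transitivity of strict decrease); equivalence proved on the nonnegative inputs (A raises ValueError on the negatives).

-- ===== PORT A =====
-- inner loop: for j in range(i+1, l): if num_lst[i] <= num_lst[j]: return False
def checkLoopJ (numLst : List Int) (i : Int) (js : List Int) : Bool :=
  match js with
  | [] => true
  | j :: rest =>
    if PySem.List.pyGetD numLst i 0 ≤ PySem.List.pyGetD numLst j 0 then false
    else checkLoopJ numLst i rest

-- outer loop: for i in range(l): … (a False from the inner loop returns from check)
def checkLoopI (numLst : List Int) (l : Int) (is : List Int) : Bool :=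
  match is with
  | [] => true
  | i :: rest =>
    if checkLoopJ numLst i (PySem.List.pyRange (i + 1) l 1) then checkLoopI numLst l rest
    else false

def check (num : Int) : Bool :=
  let numLst := (PySem.Int.toChars num).map (fun ele => (PySem.Int.ofChars? [ele]).getD 0)
  let l := PySem.List.len numLst
  checkLoopI numLst l (PySem.List.pyRange 0 l 1)

-- ===== PORT B =====
-- all(a > b for a, b in zip(s, s[1:]))
def check_alt (num : Int) : Bool :=
  let s := PySem.Int.toChars num
  (s.zip (PySem.List.slice s (some 1) none)).all (fun p => decide (p.2 < p.1))

-- ===== PRECONDITION & SPEC =====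
-- Pre_ excludes exactly the negative inputs, on which A raises ValueError (int applied to the sign character).
def Pre_check (num : Int) : Prop := 0 ≤ num
instance (num : Int) : Decidable (Pre_check num) := by unfold Pre_check; infer_instance
def pvWitness_check : Int := 951

def Spec_check (num : Int) (out : Bool) : Prop := out = check_alt num
instance (num : Int) (out : Bool) : Decidable (Spec_check num out) := by unfold Spec_check; infer_instance

-- ===== CLAIM (what is proved, stated in full; the proofs are below) =====
def Claim_equal_check : Prop := ∀ (num : Int), Dom_check num → Pre_check num → Spec_check num (check num)

-- ===== LEMMAS AND PROOFS =====

def digChars : List Char := ['0','1','2','3','4','5','6','7','8','9']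

lemma digitChar_mem (m : Nat) : Nat.digitChar (m % 10) ∈ digChars := by
  have h : m % 10 < 10 := Nat.mod_lt _ (by norm_num)
  set k := m % 10 with hk
  interval_cases k <;> decide

lemma mem_toDigitsCore (f : Nat) : ∀ (m : Nat) (acc : List Char) (c : Char),
    c ∈ Nat.toDigitsCore 10 f m acc → c ∈ acc ∨ c ∈ digChars := by
  induction f with
  | zero => intro m acc c hc; exact Or.inl hc
  | succ f ih =>
    intro m acc c hc
    simp only [Nat.toDigitsCore] at hc
    split at hc
    · rcases List.mem_cons.1 hc with h | h
      · exact Or.inr (h ▸ digitChar_mem m)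
      · exact Or.inl h
    · rcases ih _ _ _ hc with h | h
      · rcases List.mem_cons.1 h with h' | h'
        · exact Or.inr (h' ▸ digitChar_mem m)
        · exact Or.inl h'
      · exact Or.inr h

lemma toChars_digits (n : Int) (h : 0 ≤ n) :
    ∀ c ∈ PySem.Int.toChars n, c ∈ digChars := by
  intro c hc
  unfold PySem.Int.toChars at hc
  rw [if_neg (not_lt.2 h)] at hc
  rcases mem_toDigitsCore _ _ _ _ hc with h' | h'
  · simp at h'
  · exact h'

lemma digit_cmp (a b : Char) (ha : a ∈ digChars) (hb : b ∈ digChars) :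
    (¬ ((PySem.Int.ofChars? [a]).getD 0 ≤ (PySem.Int.ofChars? [b]).getD 0)) ↔ b < a := by
  fin_cases ha <;> fin_cases hb <;> decide

lemma loopJ_iff (lst : List Int) (i : Int) (js : List Int) :
    checkLoopJ lst i js = true ↔
      ∀ j ∈ js, ¬ (PySem.List.pyGetD lst i 0 ≤ PySem.List.pyGetD lst j 0) := by
  induction js with
  | nil => simp [checkLoopJ]
  | cons j rest ih =>
    simp only [checkLoopJ]
    split
    · next hc =>
      constructor
      · intro h; cases h
      · intro h; exact absurd hc (h j List.mem_cons_self)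
    · next hc =>
      rw [ih]
      constructor
      · intro h k hk
        rcases List.mem_cons.1 hk with rfl | hk
        · exact hc
        · exact h k hk
      · intro h k hk
        exact h k (List.mem_cons_of_mem _ hk)

lemma loopI_iff (lst : List Int) (l : Int) (is : List Int) :
    checkLoopI lst l is = true ↔
      ∀ i ∈ is, checkLoopJ lst i (PySem.List.pyRange (i + 1) l 1) = true := by
  induction is with
  | nil => simp [checkLoopI]
  | cons i rest ih =>
    simp only [checkLoopI]
    split
    · next hc =>
      rw [ih]
      constructor
      · intro h k hk
        rcases List.mem_cons.1 hk with rfl | hk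
        · exact hc
        · exact h k hk
      · intro h k hk
        exact h k (List.mem_cons_of_mem _ hk)
    · next hc =>
      constructor
      · intro h; cases h
      · intro h; exact absurd (h i List.mem_cons_self) hc

lemma checkA_iff (num : Int) :
    check num = true ↔
      ((PySem.Int.toChars num).map
        (fun ele => (PySem.Int.ofChars? [ele]).getD 0)).Pairwise (fun x y => ¬ x ≤ y) := by
  set lst := (PySem.Int.toChars num).map (fun ele => (PySem.Int.ofChars? [ele]).getD 0) with hlst
  show checkLoopI lst (PySem.List.len lst) (PySem.List.pyRange 0 (PySem.List.len lst) 1) = true ↔ _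
  rw [loopI_iff]
  constructor
  · intro h
    rw [List.pairwise_iff_getElem]
    intro a b hab hbl hord
    have hA := h (a : Int) (by
      rw [PySem.List.mem_pyRange_one]
      simp only [PySem.List.len_eq]
      omega)
    rw [loopJ_iff] at hA
    have hB := hA (b : Int) (by
      rw [PySem.List.mem_pyRange_one]
      simp only [PySem.List.len_eq]
      omega)
    rw [PySem.List.pyGetD_eq_getElem lst (i := (a : Int)) 0 (by omega) (by omega),
        PySem.List.pyGetD_eq_getElem lst (i := (b : Int)) 0 (by omega) (by omega)] at hB
    simpa using hB
  · intro h i hi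
    rw [loopJ_iff]
    intro j hj
    rw [PySem.List.mem_pyRange_one] at hi hj
    simp only [PySem.List.len_eq] at hi hj
    have h0i : 0 ≤ i := hi.1
    have h0j : 0 ≤ j := le_trans (by omega) hj.1
    have hil : i.toNat < lst.length := by omega
    have hjl : j.toNat < lst.length := by omega
    have hij : i.toNat < j.toNat := by omega
    have := (List.pairwise_iff_getElem.1 h) i.toNat j.toNat hil hjl hij
    rwa [PySem.List.pyGetD_eq_getElem lst (i := i) 0 h0i (by exact_mod_cast hi.2),
         PySem.List.pyGetD_eq_getElem lst (i := j) 0 h0j (by exact_mod_cast hj.2)]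

lemma zipall_iff (cs : List Char) :
    (cs.zip cs.tail).all (fun p => decide (p.2 < p.1)) = true ↔
      List.IsChain (fun a b => b < a) cs := by
  induction cs with
  | nil => simp [List.IsChain.nil]
  | cons a rest ih =>
    cases rest with
    | nil => simp [List.IsChain.singleton]
    | cons b t =>
      simp only [List.tail_cons, List.zip_cons_cons, List.all_cons, Bool.and_eq_true,
        decide_eq_true_eq, List.isChain_cons_cons]
      exact and_congr_right fun _ => ih

lemma checkB_iff (num : Int) :
    check_alt num = true ↔ List.IsChain (fun a b => b < a) (PySem.Int.toChars num) := by
  show ((PySem.Int.toChars num).zip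
      (PySem.List.slice (PySem.Int.toChars num) (some 1) none)).all (fun p => decide (p.2 < p.1)) = true ↔ _
  rw [PySem.List.slice_from_one]
  exact zipall_iff _

-- ===== VERDICT (by name: the statement is the Claim_ definition above) =====
theorem check_spec : Claim_equal_check := by
  intro num _ hpre
  unfold Spec_check
  rw [Bool.eq_iff_iff, checkA_iff, checkB_iff, List.pairwise_map]
  have hdig := toChars_digits num hpre
  have hkey := @List.isChain_iff_pairwise Char (fun a b => b < a) (PySem.Int.toChars num)
    ⟨fun h1 h2 => lt_trans h2 h1⟩
  rw [hkey]
  constructor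
  · intro h
    exact h.imp_of_mem (fun {a b} ha hb hr =>
      (digit_cmp a b (hdig a ha) (hdig b hb)).1 hr)
  · intro h
    exact h.imp_of_mem (fun {a b} ha hb hr =>
      (digit_cmp a b (hdig a ha) (hdig b hb)).2 hr)
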